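-- pv_equiv track=rewrite | github.com/emmaneugene/practice | online-assessments/replaceToFormPalindrome.py | solution
-- ===== SOURCE A (Python) =====
-- def solution(S: str) ->  str:
--     # Did not take into account '?' in the middle
--
--     output = ''
--
--     for i in range(len(S) // 2):
--         if S[i] == '?' or S[-1-i] == '?':
--             if S[i] == '?' and S[-1-i] != '?':
--                 output += S[-1-i]
--             elif S[i] != '?' and S[-1-i] == '?':
--                 output += S[i]
--             else:
--                 output += 'a'
--         elif S[i] == S[-1-i]:
--             output += S[i]
--         else:
--             return 'NO'
--
--     middle: str = ''
--
--     if len(S) % 2 == 1: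
--         middle = S[len(S) // 2] if S[len(S) // 2] != '?' else 'a'
--
--     return output + middle + output[::-1]
-- ===== SOURCE B (Python) =====
-- def solution(S: str) -> str:
--     n = len(S)
--     t = [S[i] if S[i] != '?' else (S[~i] if S[~i] != '?' else 'a')
--          for i in range(n)]
--     return ''.join(t) if t == t[::-1] else 'NO'
-- ===== Notes on version B (the rewrite author's own statement) =====
-- stated objective: simpler
-- what changed: B first fills every '?' by mirroring (one whole-string comprehension, no per-pair conflict case analysis), then decides with a single palindrome test t == t[::-1]; A's incremental half-build with early 'NO' return, separate middle branch and reversed-half assembly disappear.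
import Mathlib
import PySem

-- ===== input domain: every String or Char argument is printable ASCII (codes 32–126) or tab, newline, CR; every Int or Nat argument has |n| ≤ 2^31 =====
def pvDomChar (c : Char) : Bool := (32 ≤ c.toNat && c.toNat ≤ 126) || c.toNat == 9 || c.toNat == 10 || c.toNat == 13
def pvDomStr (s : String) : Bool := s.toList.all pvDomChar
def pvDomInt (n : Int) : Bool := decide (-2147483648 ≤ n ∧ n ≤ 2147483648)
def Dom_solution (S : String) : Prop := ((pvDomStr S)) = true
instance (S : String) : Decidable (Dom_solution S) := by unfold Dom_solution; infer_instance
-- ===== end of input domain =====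

-- B first fills every '?' by mirroring in one whole-string comprehension and then decides
-- with a single palindrome test, replacing A's incremental half-build with early 'NO'
-- return, separate middle branch and reversed-half assembly; same O(n) cost, simpler.
-- Return-value equivalence only.

-- ===== PORT A =====
-- A: loop i over range(len(S)//2), accumulating `output`; early return 'NO' is `none`.
def loopA (cs : List Char) (i : Nat) (output : List Char) : Option (List Char) :=
  if i < cs.length / 2 then
    match PySem.List.pyGet? cs (i : Int), PySem.List.pyGet? cs (-1 - (i : Int)) with
    | some a, some b =>
        (if a = '?' ∨ b = '?' then
           if a = '?' ∧ b ≠ '?' then some b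
           else if a ≠ '?' ∧ b = '?' then some a
           else some 'a'
         else if a = b then some a
         else none).bind (fun c => loopA cs (i + 1) (output ++ [c]))
    | _, _ => none
  else some output
termination_by cs.length / 2 - i

def solution (S : String) : String :=
  let cs := S.toList
  match loopA cs 0 [] with
  | none => "NO"
  | some output =>
    let middle : List Char :=
      if cs.length % 2 = 1 then
        match PySem.List.pyGet? cs ((cs.length / 2 : Nat) : Int) with
        | some c => if c ≠ '?' then [c] else ['a']
        | none => []
      else []
    String.mk (output ++ middle ++ output.reverse)

-- ===== PORT B =====
-- B: t = [S[i] if S[i] != '?' else (S[~i] if S[~i] != '?' else 'a') for i in range(n)]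
-- S[~i] = S[-1-i]; the `_, _ => 'a'` arm is unreachable (i < len), kept to stay total.
def fillAt (cs : List Char) (i : Nat) : Char :=
  match PySem.List.pyGet? cs (i : Int), PySem.List.pyGet? cs (-1 - (i : Int)) with
  | some a, some b => if a ≠ '?' then a else if b ≠ '?' then b else 'a'
  | _, _ => 'a'

def fillB (cs : List Char) : List Char := (List.range cs.length).map (fillAt cs)

def solution_alt (S : String) : String :=
  let t := fillB S.toList
  if t = t.reverse then String.mk t else "NO"

-- ===== PRECONDITION & SPEC =====
def Spec_solution (S : String) (out : String) : Prop := out = solution_alt S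
instance (S : String) (out : String) : Decidable (Spec_solution S out) := by unfold Spec_solution; infer_instance

-- ===== CLAIM (what is proved, stated in full; the proofs are below) =====
def Claim_equal_solution : Prop := ∀ (S : String), Dom_solution S → Spec_solution S (solution S)

-- ===== LEMMAS AND PROOFS =====

-- A's per-pair resolution, as a function
def resolveB (a b : Char) : Option Char :=
  if a = '?' ∧ b = '?' then some 'a'
  else if a = '?' then some b
  else if b = '?' then some a
  else if a = b then some a
  else none

-- B's per-position fill function
def fillF (a b : Char) : Char := if a ≠ '?' then a else if b ≠ '?' then b else 'a'

-- full resolved palindrome of a segment, peeling both ends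
def solveCore : List Char → Option (List Char)
  | [] => some []
  | [c] => some [if c = '?' then 'a' else c]
  | a :: b :: t =>
      (resolveB a ((b :: t).getLastD 'a')).bind
        (fun c => (solveCore ((b :: t).dropLast)).map (fun r => c :: r ++ [c]))
termination_by l => l.length
decreasing_by simp

-- just the resolved first half
def pairsRes : List Char → Option (List Char)
  | [] => some []
  | [_] => some []
  | a :: b :: t =>
      (resolveB a ((b :: t).getLastD 'a')).bind
        (fun c => (pairsRes ((b :: t).dropLast)).map (fun r => c :: r))
termination_by l => l.length
decreasing_by simp

def middleOf (s : List Char) : List Char :=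
  if s.length % 2 = 1 then [if s.getD (s.length / 2) 'a' = '?' then 'a' else s.getD (s.length / 2) 'a']
  else []

lemma step_eq (a b : Char) :
    (if a = '?' ∨ b = '?' then
       if a = '?' ∧ b ≠ '?' then some b
       else if a ≠ '?' ∧ b = '?' then some a
       else some 'a'
     else if a = b then some a
     else none) = resolveB a b := by
  unfold resolveB
  by_cases ha : a = '?' <;> by_cases hb : b = '?' <;> simp [ha, hb]

lemma A_loop : ∀ (n : Nat) (seg front back out : List Char), seg.length = n →
    front.length = back.length →
    loopA (front ++ seg ++ back) front.length out = (pairsRes seg).map (out ++ ·) := by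
  intro n
  induction n using Nat.strong_induction_on with
  | _ n ih =>
    intro seg front back out hs hfb
    match seg with
    | [] =>
      rw [loopA, if_neg (by simp; omega)]
      simp [pairsRes]
    | [c] =>
      rw [loopA, if_neg (by simp; omega)]
      simp [pairsRes]
    | a :: b :: t =>
      rcases (b :: t).eq_nil_or_concat with hnil | ⟨t', b', hcc⟩
      · exact absurd hnil (by simp)
      have h2 : (b :: t) = t' ++ [b'] := by rw [hcc, List.concat_eq_append]
      have h1 : t.length = t'.length := by
        have := congrArg List.length h2; simp at this; omega
      have hlt : t'.length < n := by simp at hs; omega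
      have hA : PySem.List.pyGet? (front ++ (a :: b :: t) ++ back) (front.length : Int)
          = some a := by
        have hx : front ++ (a :: b :: t) ++ back = front ++ a :: (b :: t ++ back) := by simp
        rw [hx, PySem.List.pyGet?_append_length]
      have hB : PySem.List.pyGet? (front ++ (a :: b :: t) ++ back)
          (-1 - (front.length : Int)) = some b' := by
        have hk : (-1 - (front.length : Int)) = -(((front.length + 1 : Nat)) : Int) := by
          push_cast; ring
        rw [hk, PySem.List.pyGet?_neg_natCast _ _ (by omega) (by simp)]
        have hx : front ++ (a :: b :: t) ++ back = (front ++ a :: t') ++ b' :: back := by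
          simp [h2]
        have hidx : (front ++ (a :: b :: t) ++ back).length - (front.length + 1)
            = (front ++ a :: t').length := by simp [h1, ← hfb]; omega
        rw [hidx, hx, List.getElem?_append_right (by simp)]
        simp
      rw [loopA, if_pos (by simp; omega), hA, hB]
      dsimp only
      rw [step_eq]
      cases hr : resolveB a b' with
      | none =>
        rw [pairsRes, h2, List.getLastD_concat, List.dropLast_concat, hr]
        simp
      | some c =>
        simp only [Option.bind_some]
        have hx : front ++ (a :: b :: t) ++ back = (front ++ [a]) ++ t' ++ (b' :: back) := by
          simp [h2]
        have hi1 : front.length + 1 = (front ++ [a]).length := by simp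
        rw [hx, hi1, ih t'.length hlt t' (front ++ [a]) (b' :: back) (out ++ [c]) rfl
          (by simp; omega)]
        rw [pairsRes, h2, List.getLastD_concat, List.dropLast_concat, hr]
        cases pairsRes t' with
        | none => simp
        | some o => simp

lemma mid_step (a b : Char) (t : List Char) : middleOf (a :: (t ++ [b])) = middleOf t := by
  unfold middleOf
  have hlen : (a :: (t ++ [b])).length = t.length + 2 := by simp
  rw [hlen]
  have hpar : (t.length + 2) % 2 = t.length % 2 := by omega
  rw [hpar]
  by_cases h : t.length % 2 = 1
  · have hidx : (t.length + 2) / 2 = t.length / 2 + 1 := by omega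
    have ht : t.length / 2 < t.length := by omega
    rw [hidx, List.getD_cons_succ]
    simp [h, List.getD_eq_getElem?_getD, List.getElem?_append_left ht, ht]
  · simp [h]

lemma core_assemble : ∀ (n : Nat) (s : List Char), s.length = n →
    solveCore s = (pairsRes s).map (fun o => o ++ middleOf s ++ o.reverse) := by
  intro n
  induction n using Nat.strong_induction_on with
  | _ n ih =>
    intro s hs
    match s with
    | [] => simp [solveCore, pairsRes, middleOf]
    | [c] => simp [solveCore, pairsRes, middleOf]
    | a :: b :: t =>
      rcases (b :: t).eq_nil_or_concat with h | ⟨t', b', h⟩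
      · exact absurd h (by simp)
      · have h2 : (b :: t) = t' ++ [b'] := by rw [h, List.concat_eq_append]
        have h1 := congrArg List.length h2
        simp at h1 hs
        have hlt : t'.length < n := by omega
        rw [solveCore, pairsRes, h2, List.getLastD_concat, List.dropLast_concat, mid_step]
        rw [ih t'.length hlt t' rfl]
        cases resolveB a b' with
        | none => simp
        | some c =>
          cases pairsRes t' with
          | none => simp
          | some o => simp [middleOf]

lemma middleA_eq (cs : List Char) :
    (if cs.length % 2 = 1 then
        match PySem.List.pyGet? cs ((cs.length / 2 : Nat) : Int) with
        | some c => if c ≠ '?' then [c] else ['a']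
        | none => []
      else []) = middleOf cs := by
  unfold middleOf
  by_cases h : cs.length % 2 = 1
  · have hlt : cs.length / 2 < cs.length := by omega
    simp only [h, if_true, PySem.List.pyGet?_natCast, List.getElem?_eq_getElem hlt]
    by_cases hq : cs[cs.length / 2] = '?' <;>
      simp [hq, List.getD_eq_getElem?_getD, List.getElem?_eq_getElem hlt]
  · simp [h]

-- pointwise value of B's comprehension entry, for i < cs.length
lemma fillAt_eq (cs : List Char) (i : Nat) (h : i < cs.length) :
    fillAt cs i = fillF (cs.getD i 'a') (cs.getD (cs.length - 1 - i) 'a') := by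
  unfold fillAt fillF
  have hk : (-1 - (i : Int)) = -(((i + 1 : Nat)) : Int) := by push_cast; ring
  rw [hk, PySem.List.pyGet?_neg_natCast _ _ (by omega) (by omega),
    PySem.List.pyGet?_natCast, List.getElem?_eq_getElem h,
    List.getElem?_eq_getElem (by omega : cs.length - (i + 1) < cs.length)]
  have : cs.length - (i + 1) = cs.length - 1 - i := by omega
  simp [this, List.getD_eq_getElem?_getD, h, (by omega : cs.length - 1 - i < cs.length)]

-- peeling both ends off B's fill
lemma fill_peel (a b : Char) (s : List Char) :
    fillB (a :: s ++ [b]) = fillF a b :: fillB s ++ [fillF b a] := by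
  apply List.ext_getElem
  · simp [fillB]
  · intro i h1 h2
    have hlen : (a :: s ++ [b]).length = s.length + 2 := by simp
    have hi : i < s.length + 2 := by
      have := h1; simp only [fillB, List.length_map, List.length_range, hlen] at this
      exact this
    have hL : (fillB (a :: s ++ [b]))[i] = fillAt (a :: s ++ [b]) i := by
      simp [fillB]
    rw [hL, fillAt_eq _ _ (by omega)]
    rcases Nat.eq_zero_or_pos i with h0 | h0
    · subst h0
      have m1 : (a :: s ++ [b]).length - 1 - 0 = s.length + 1 := by simp
      have g2 : (a :: s ++ [b]).getD (s.length + 1) 'a' = b := by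
        simp [List.getD_eq_getElem?_getD]
      rw [m1, g2]
      simp
    · rcases Nat.lt_or_ge i (s.length + 1) with hm | hm
      · obtain ⟨j, rfl⟩ : ∃ j, i = j + 1 := ⟨i - 1, by omega⟩
        have hj : j < s.length := by omega
        have g1 : (a :: s ++ [b]).getD (j + 1) 'a' = s.getD j 'a' := by
          simp [List.getD_eq_getElem?_getD, List.getElem?_append_left hj]
        have m1 : (a :: s ++ [b]).length - 1 - (j + 1) = (s.length - 1 - j) + 1 := by
          simp; omega
        have hj2 : s.length - 1 - j < s.length := by omega
        have g2 : (a :: s ++ [b]).getD ((s.length - 1 - j) + 1) 'a'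
            = s.getD (s.length - 1 - j) 'a' := by
          simp [List.getD_eq_getElem?_getD, List.getElem?_append_left hj2]
        rw [g1, m1, g2]
        have hR : (fillF a b :: fillB s ++ [fillF b a])[j + 1] = (fillB s)[j]'(by simp [fillB]; omega) := by
          simp only [List.cons_append, List.getElem_cons_succ]
          rw [List.getElem_append_left (by simp [fillB]; omega)]
        rw [hR]
        simp only [fillB, List.getElem_map, List.getElem_range]
        rw [fillAt_eq _ _ hj]
      · have hieq : i = s.length + 1 := by omega
        subst hieq
        have g1 : (a :: s ++ [b]).getD (s.length + 1) 'a' = b := by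
          simp [List.getD_eq_getElem?_getD]
        have m1 : (a :: s ++ [b]).length - 1 - (s.length + 1) = 0 := by simp
        rw [g1, m1]
        have g2 : (a :: s ++ [b]).getD 0 'a' = a := by simp
        rw [g2]
        have hq : (fillF a b :: fillB s ++ [fillF b a])[s.length + 1]? = some (fillF b a) := by
          simp [fillB]
        exact (Option.some.inj ((List.getElem?_eq_getElem h2).symm.trans hq)).symm

lemma fillF_resolve (a b c : Char) (h : resolveB a b = some c) :
    fillF a b = c ∧ fillF b a = c := by
  unfold resolveB at h
  by_cases ha : a = '?' <;> by_cases hb : b = '?'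
  · simp [ha, hb] at h; simp [fillF, ha, hb, ← h]
  · simp [ha, hb] at h; simp [fillF, ha, hb, ← h]
  · simp [ha, hb] at h; simp [fillF, ha, hb, ← h]
  · simp [ha, hb] at h
    obtain ⟨hab, hac⟩ := h
    subst hac; subst hab
    simp [fillF, ha]

lemma fillF_conflict (a b : Char) (h : resolveB a b = none) :
    fillF a b = a ∧ fillF b a = b ∧ a ≠ b := by
  unfold resolveB at h
  by_cases ha : a = '?' <;> by_cases hb : b = '?'
  · simp [ha, hb] at h
  · simp [ha, hb] at h
  · simp [ha, hb] at h
  · simp [ha, hb] at h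
    simp [fillF, ha, hb, h]

-- main bridge: B's fill agrees with solveCore when it succeeds (and is then a
-- palindrome), and is not a palindrome exactly when solveCore fails
lemma fill_core : ∀ (n : Nat) (s : List Char), s.length = n →
    (∀ r, solveCore s = some r → fillB s = r ∧ r.reverse = r) ∧
    (solveCore s = none → fillB s ≠ (fillB s).reverse) := by
  intro n
  induction n using Nat.strong_induction_on with
  | _ n ih =>
    intro s hs
    match s with
    | [] =>
      constructor
      · intro r hr
        simp only [solveCore, Option.some.injEq] at hr
        subst hr
        simp [fillB]
      · intro hr; simp [solveCore] at hr
    | [c] =>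
      constructor
      · intro r hr
        simp only [solveCore, Option.some.injEq] at hr
        subst hr
        constructor
        · have h1 : fillB [c] = [fillAt [c] 0] := by simp [fillB, List.range_succ]
          rw [h1, fillAt_eq _ 0 (by simp)]
          by_cases hq : c = '?' <;> simp [fillF, hq]
        · simp
      · intro hr; simp [solveCore] at hr
    | a :: b :: t =>
      rcases (b :: t).eq_nil_or_concat with hnil | ⟨t', b', hcc⟩
      · exact absurd hnil (by simp)
      have h2 : (b :: t) = t' ++ [b'] := by rw [hcc, List.concat_eq_append]
      have h1 : t.length = t'.length := by
        have := congrArg List.length h2; simp at this; omega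
      have hlt : t'.length < n := by simp at hs; omega
      have hfill : fillB (a :: b :: t) = fillF a b' :: fillB t' ++ [fillF b' a] := by
        have : a :: b :: t = a :: t' ++ [b'] := by simp [h2]
        rw [this, fill_peel]
      have hcore : solveCore (a :: b :: t)
          = (resolveB a b').bind (fun c => (solveCore t').map (fun r => c :: r ++ [c])) := by
        rw [solveCore, h2, List.getLastD_concat, List.dropLast_concat]
      obtain ⟨ihs, ihn⟩ := ih t'.length hlt t' rfl
      constructor
      · intro r hr
        rw [hcore] at hr
        cases hra : resolveB a b' with
        | none => rw [hra] at hr; simp at hr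
        | some c =>
          rw [hra] at hr
          cases hrc : solveCore t' with
          | none => rw [hrc] at hr; simp at hr
          | some r' =>
            rw [hrc] at hr
            simp only [Option.bind_some, Option.map_some, Option.some.injEq] at hr
            subst hr
            obtain ⟨hf1, hf2⟩ := fillF_resolve a b' c hra
            obtain ⟨hfe, hpal⟩ := ihs r' hrc
            constructor
            · rw [hfill, hf1, hf2, hfe]
            · simp [hpal]
      · intro hr
        rw [hcore] at hr
        cases hra : resolveB a b' with
        | none =>
          obtain ⟨hf1, hf2, hne⟩ := fillF_conflict a b' hra
          rw [hfill, hf1, hf2]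
          intro heq
          have := congrArg (fun l => l.headI) heq
          simp at this
          exact hne this
        | some c =>
          rw [hra] at hr
          cases hrc : solveCore t' with
          | none =>
            obtain ⟨hf1, hf2⟩ := fillF_resolve a b' c hra
            rw [hfill, hf1, hf2]
            intro heq
            apply ihn hrc
            simp only [List.cons_append, List.reverse_cons, List.reverse_append,
              List.reverse_nil, List.nil_append, List.cons.injEq, true_and,
              List.append_left_inj] at heq
            exact heq
          | some r' => rw [hrc] at hr; simp at hr

-- ===== VERDICT (by name: the statement is the Claim_ definition above) =====
theorem solution_spec : Claim_equal_solution := by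
  intro S _
  unfold Spec_solution solution solution_alt
  dsimp only
  have hA := A_loop S.toList.length S.toList [] [] [] rfl rfl
  simp only [List.nil_append, List.append_nil, List.length_nil] at hA
  rw [hA]
  have hca := core_assemble S.toList.length S.toList rfl
  obtain ⟨hfs, hfn⟩ := fill_core S.toList.length S.toList rfl
  cases hp : pairsRes S.toList with
  | none =>
    have hcn : solveCore S.toList = none := by rw [hca, hp]; rfl
    have := hfn hcn
    simp [this]
  | some o =>
    have hcs : solveCore S.toList = some (o ++ middleOf S.toList ++ o.reverse) := by
      rw [hca, hp]; rfl
    obtain ⟨hfe, hpal⟩ := hfs _ hcs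
    rw [middleA_eq]
    simp only [Option.map_some]
    rw [hfe]
    rw [if_pos hpal.symm]
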